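-- pv_equiv track=rewrite | github.com/Yuan-paper-project/scenario-generator-chatbot | utilities/remove_comments.py | remove_standalone_comments
-- ===== SOURCE A (Python) =====
-- def is_section_comment(line):
--     stripped = line.strip()
--     return stripped.startswith('#####')
--
-- def is_standalone_comment(line):
--     stripped = line.strip()
--     if not stripped or not stripped.startswith('#'):
--         return False
--
--     if is_section_comment(line):
--         return False
--
--     return True
--
-- def remove_standalone_comments(content):
--     lines = content.split('\n')
--     filtered_lines = []
--     in_section_header = False
--
--     for i, line in enumerate(lines):
--         # Keep empty lines
--         if not line.strip():
--             filtered_lines.append(line)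
--             continue
--
--         if is_section_comment(line):
--             filtered_lines.append(line)
--             in_section_header = not in_section_header  # Toggle section header mode
--             continue
--
--         if in_section_header:
--             filtered_lines.append(line)
--             continue
--
--         if not is_standalone_comment(line):
--             filtered_lines.append(line)
--             continue
--     return '\n'.join(filtered_lines)
-- ===== SOURCE B (Python) =====
-- def _removable(line):
--     s = line.strip()
--     return s.startswith('#') and not s.startswith('#####')
--
-- def remove_standalone_comments(content):
--     lines = content.split('\n')
--     # pass 1: per-line 'inside section header' flag (parity of '#####' lines seen BEFORE this line)
--     flags = []
--     inside = False
--     for line in lines: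
--         flags.append(inside)
--         if line.strip().startswith('#####'):
--             inside = not inside
--     # pass 2: keep a line unless it is a standalone comment outside a section header
--     return '\n'.join(l for l, f in zip(lines, flags) if f or not _removable(l))
-- ===== Notes on version B (the rewrite author's own statement) =====
-- stated objective: alternative
-- what changed: Replaced the single state-threaded filter loop (accumulator list plus a toggling in_section flag with four continue branches) by a precompute-then-filter decomposition: one pass records the section parity before each line into a flags table, then a zip comprehension keeps a line unless it is a removable comment outside a section.
import Mathlib
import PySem

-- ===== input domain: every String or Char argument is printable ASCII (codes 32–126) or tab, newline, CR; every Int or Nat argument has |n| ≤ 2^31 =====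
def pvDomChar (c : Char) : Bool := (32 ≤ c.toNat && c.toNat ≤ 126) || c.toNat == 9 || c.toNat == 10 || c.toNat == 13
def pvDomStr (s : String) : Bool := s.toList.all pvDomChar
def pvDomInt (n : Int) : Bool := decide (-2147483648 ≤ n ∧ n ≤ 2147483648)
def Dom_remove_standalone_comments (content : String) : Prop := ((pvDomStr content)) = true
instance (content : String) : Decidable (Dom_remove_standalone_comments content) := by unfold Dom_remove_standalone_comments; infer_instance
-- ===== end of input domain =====

-- B replaces A's state-threaded filter loop by a precompute-flags-then-filter decomposition (alternative, same cost).

-- ===== PORT A =====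
def rscIsSection (line : String) : Bool :=
  PySem.Str.startswith (PySem.Str.strip line) "#####"

def rscIsStandalone (line : String) : Bool :=
  let stripped := PySem.Str.strip line
  if stripped == "" || !(PySem.Str.startswith stripped "#") then false
  else if rscIsSection line then false
  else true

def rscStep (st : List String × Bool) (line : String) : List String × Bool :=
  if PySem.Str.strip line == "" then (st.1 ++ [line], st.2)
  else if rscIsSection line then (st.1 ++ [line], !st.2)
  else if st.2 then (st.1 ++ [line], st.2)
  else if !(rscIsStandalone line) then (st.1 ++ [line], st.2)
  else st

def remove_standalone_comments (content : String) : String :=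
  -- split? with the nonempty separator "\n" always returns some; getD [] only discharges the option
  let lines := (PySem.Str.split? content "\n").getD []
  PySem.Str.join "\n" (lines.foldl rscStep ([], false)).1

-- ===== PORT B =====
def rscRemovable (line : String) : Bool :=
  let s := PySem.Str.strip line
  PySem.Str.startswith s "#" && !(PySem.Str.startswith s "#####")

def rscFlags : List String → Bool → List Bool
  | [], _ => []
  | l :: ls, inside =>
      inside :: rscFlags ls (if PySem.Str.startswith (PySem.Str.strip l) "#####" then !inside else inside)

def remove_standalone_comments_alt (content : String) : String :=
  let lines := (PySem.Str.split? content "\n").getD []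
  let flags := rscFlags lines false
  PySem.Str.join "\n" (((lines.zip flags).filter (fun p => p.2 || !rscRemovable p.1)).map (·.1))

-- ===== PRECONDITION & SPEC =====
def Spec_remove_standalone_comments (content : String) (out : String) : Prop := out = remove_standalone_comments_alt content
instance (content : String) (out : String) : Decidable (Spec_remove_standalone_comments content out) := by unfold Spec_remove_standalone_comments; infer_instance

-- ===== CLAIM (what is proved, stated in full; the proofs are below) =====
def Claim_equal_remove_standalone_comments : Prop := ∀ (content : String), Dom_remove_standalone_comments content → Spec_remove_standalone_comments content (remove_standalone_comments content)

-- ===== LEMMAS AND PROOFS =====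

theorem rsc_loop (lines : List String) (acc : List String) (inside : Bool) :
    (lines.foldl rscStep (acc, inside)).1 =
      acc ++ ((lines.zip (rscFlags lines inside)).filter
        (fun p => p.2 || !rscRemovable p.1)).map (·.1) := by
  induction lines generalizing acc inside with
  | nil => simp
  | cons l ls ih =>
    simp only [List.foldl_cons, rscFlags, List.zip_cons_cons, List.filter_cons]
    by_cases he : PySem.Chars.strip l.toList = []
    · have hA : PySem.Str.strip l = "" :=
        String.toList_inj.mp (by simp [PySem.Str.toList_strip, he])
      have h1 : PySem.Chars.startswith ([] : List Char) ['#'] = false := by decide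
      have h5 : PySem.Chars.startswith ([] : List Char) ['#', '#', '#', '#', '#'] = false := by decide
      have hrem : rscRemovable l = false := by
        simp [rscRemovable, PySem.Str.startswith_eq, PySem.Str.toList_strip, he, h1, h5]
      simp [rscStep, hA, PySem.Str.startswith_eq, h5, hrem, ih]
    · have hA : ¬ PySem.Str.strip l = "" := fun h => he (by
        rw [← PySem.Str.toList_strip, h]; simp)
      by_cases hsec : PySem.Chars.startswith (PySem.Chars.strip l.toList) ['#', '#', '#', '#', '#'] = true
      · have hsecS : rscIsSection l = true := by
          simp [rscIsSection, PySem.Str.startswith_eq, PySem.Str.toList_strip, hsec]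
        have hrem : rscRemovable l = false := by
          simp [rscRemovable, PySem.Str.startswith_eq, PySem.Str.toList_strip, hsec]
        simp [rscStep, hA, hsecS, PySem.Str.startswith_eq, PySem.Str.toList_strip, hsec, hrem, ih]
      · have hsec5 : PySem.Chars.startswith (PySem.Chars.strip l.toList) ['#', '#', '#', '#', '#'] = false := by
          simpa using hsec
        have hsecS : rscIsSection l = false := by
          simp [rscIsSection, PySem.Str.startswith_eq, PySem.Str.toList_strip, hsec5]
        cases inside with
        | true =>
          simp [rscStep, hA, hsecS, PySem.Str.startswith_eq, PySem.Str.toList_strip, hsec5, ih]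
        | false =>
          by_cases hh : PySem.Chars.startswith (PySem.Chars.strip l.toList) ['#'] = true
          · have hst : rscIsStandalone l = true := by
              simp [rscIsStandalone, hA, hsecS, PySem.Str.startswith_eq, PySem.Str.toList_strip, hh]
            have hrem : rscRemovable l = true := by
              simp [rscRemovable, PySem.Str.startswith_eq, PySem.Str.toList_strip, hh, hsec5]
            simp [rscStep, hA, hsecS, hst, hrem, PySem.Str.startswith_eq,
              PySem.Str.toList_strip, hsec5, ih]
          · have hh' : PySem.Chars.startswith (PySem.Chars.strip l.toList) ['#'] = false := by
              simpa using hh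
            have hst : rscIsStandalone l = false := by
              simp [rscIsStandalone, PySem.Str.startswith_eq, PySem.Str.toList_strip, hh']
            have hrem : rscRemovable l = false := by
              simp [rscRemovable, PySem.Str.startswith_eq, PySem.Str.toList_strip, hh']
            simp [rscStep, hA, hsecS, hst, hrem, PySem.Str.startswith_eq,
              PySem.Str.toList_strip, hsec5, ih]

-- ===== VERDICT (by name: the statement is the Claim_ definition above) =====
theorem remove_standalone_comments_spec : Claim_equal_remove_standalone_comments := by
  intro content _
  unfold Spec_remove_standalone_comments remove_standalone_comments remove_standalone_comments_alt
  simp only [rsc_loop, List.nil_append]
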